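-- pv_equiv track=rewrite | github.com/Crazy-Ginger/Python | University/Software1/Prac12/practical12.py | __caller
-- ===== SOURCE A (Python) =====
-- def __caller(words):
--     n_words = []
--     alter = True
--     for i in range(len(words)*2):
--         if alter:
--             alter = False
--             n_words.append(words[i//2] + "1")
--         else:
--             alter = True
--             n_words.append(words[i//2] + "0")
--
--     return n_words
-- ===== SOURCE B (Python) =====
-- def __caller(words):
--     return [w + s for w in words for s in ("1", "0")]
-- ===== Notes on version B (the rewrite author's own statement) =====
-- stated objective: simpler
-- what changed: B iterates the words directly and emits word+'1' and word+'0' per word as a flat comprehension, removing A's 2n-step index loop, the i//2 arithmetic and the alternating boolean flag.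
import Mathlib
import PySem

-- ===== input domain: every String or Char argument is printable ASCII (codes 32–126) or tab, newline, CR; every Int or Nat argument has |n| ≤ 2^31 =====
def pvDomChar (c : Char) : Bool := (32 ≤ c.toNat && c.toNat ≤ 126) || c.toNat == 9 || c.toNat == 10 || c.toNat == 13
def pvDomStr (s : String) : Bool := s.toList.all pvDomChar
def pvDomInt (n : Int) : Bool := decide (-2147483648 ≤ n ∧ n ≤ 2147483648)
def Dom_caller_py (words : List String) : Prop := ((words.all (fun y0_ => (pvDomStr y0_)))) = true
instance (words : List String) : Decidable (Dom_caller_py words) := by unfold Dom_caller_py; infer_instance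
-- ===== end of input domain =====

-- B replaces A's 2n-step index loop with alternating flag by a direct flat traversal of the words (simpler).


-- ===== PORT A =====
-- loop body: state = (n_words, alter); words[i//2] is always in range (i < 2*len), so pyGetD's default is never used
def callerStep (words : List String) (st : List String × Bool) (i : Int) : List String × Bool :=
  if st.2 then
    (st.1 ++ [PySem.List.pyGetD words (PySem.Int.floordiv i 2) "" ++ "1"], false)
  else
    (st.1 ++ [PySem.List.pyGetD words (PySem.Int.floordiv i 2) "" ++ "0"], true)

def caller_py (words : List String) : List String :=
  ((PySem.List.pyRange 0 ((words.length : Int) * 2) 1).foldl (callerStep words) ([], true)).1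

-- ===== PORT B =====
def caller_py_alt (words : List String) : List String :=
  words.flatMap (fun w => [w ++ "1", w ++ "0"])

-- ===== PRECONDITION & SPEC =====
def Spec_caller_py (words : List String) (out : List String) : Prop := out = caller_py_alt words
instance (words : List String) (out : List String) : Decidable (Spec_caller_py words out) := by unfold Spec_caller_py; infer_instance

-- ===== CLAIM (what is proved, stated in full; the proofs are below) =====
def Claim_equal_caller_py : Prop := ∀ (words : List String), Dom_caller_py words → Spec_caller_py words (caller_py words)

-- ===== LEMMAS AND PROOFS =====
theorem caller_loop (words : List String) (n : Nat) (hn : n ≤ words.length) (acc : List String) :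
    (PySem.List.pyRange 0 ((n : Int) * 2) 1).foldl (callerStep words) (acc, true)
      = (acc ++ (words.take n).flatMap (fun w => [w ++ "1", w ++ "0"]), true) := by
  induction n generalizing acc with
  | zero => simp
  | succ m ih =>
    have hm : m < words.length := hn
    have h1 : ((m : Int) * 2) ≤ (m : Int) * 2 + 1 := by omega
    have h0 : (0 : Int) ≤ (m : Int) * 2 := by positivity
    have hsplit : PySem.List.pyRange 0 (((m : Nat) + 1 : Nat) * 2) 1
        = PySem.List.pyRange 0 ((m : Int) * 2) 1 ++ [(m : Int) * 2, (m : Int) * 2 + 1] := by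
      have e1 : (((m : Nat) + 1 : Nat) : Int) * 2 = ((m : Int) * 2 + 1) + 1 := by push_cast; ring
      rw [e1, PySem.List.pyRange_one_succ_right (by omega), PySem.List.pyRange_one_succ_right (by omega)]
      simp
    rw [hsplit, List.foldl_append, ih (by omega)]
    have hidx : PySem.Int.floordiv ((m : Int) * 2) 2 = (m : Int) := by
      show ((m : Int) * 2).fdiv 2 = (m : Int)
      exact Int.mul_fdiv_cancel _ (by norm_num)
    have hidx2 : PySem.Int.floordiv ((m : Int) * 2 + 1) 2 = (m : Int) := by
      show ((m : Int) * 2 + 1).fdiv 2 = (m : Int)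
      rw [add_comm, Int.add_mul_fdiv_right _ _ (by norm_num : (2:Int) ≠ 0)]
      norm_num [Int.fdiv]
    have hget : PySem.List.pyGetD words ((m : Int)) "" = words[m] := by
      rw [PySem.List.pyGetD_of_nonneg _ _ (by omega)]
      simp [hm]
    rw [List.foldl_cons, List.foldl_cons, List.foldl_nil]
    simp only [callerStep, hidx, hidx2, hget]
    rw [List.take_add_one, List.flatMap_append]
    simp [hm]

theorem caller_py_spec : Claim_equal_caller_py := by
  intro words _
  unfold Spec_caller_py caller_py caller_py_alt
  have h := caller_loop words words.length le_rfl []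
  rw [show ((words.length : Int) * 2) = ((words.length : Nat) : Int) * 2 from rfl, h]
  simp
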